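-- pv_equiv track=rewrite | github.com/mohitsinghnegi1/CodingQuestions | Leetcode Everyday challenge/Array Nesting.py | dp
-- ===== SOURCE A (Python) =====
-- def dp(nums,i,visited,d):
--
--     if(visited[i]==1):
--         return 0
--     if(d[i]!=0):
--         return d[i]
--     visited[i] = 1
--     d[i] = 1+ dp(nums,nums[i],visited,d)
--     return d[i]
-- ===== SOURCE B (Python) =====
-- def dp(nums, i, visited, d):
--     # Iterative walk replacing A's memoized recursion; performs the same
--     # in-place updates of visited and d (return-value equivalence is what is proved).
--     current = i
--     path = []
--     while True:
--         if visited[current] == 1: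
--             base = 0
--             break
--         if d[current] != 0:
--             base = d[current]
--             break
--         visited[current] = 1
--         path.append(current)
--         current = nums[current]
--     count = base
--     for idx in reversed(path):
--         count += 1
--         d[idx] = count
--     return base + len(path)
-- ===== Notes on version B (the rewrite author's own statement) =====
-- stated objective: alternative
-- what changed: Replaced A's memoized recursion (call stack unwinding computes the chain length) by an explicit iterative walk that records the traversed path in a list, then back-fills the memo table from the path's tail and returns base + len(path).
-- outside the precondition, e.g. on dp([1, 9], 0, [0, 1], [0, 0]): A returns 1, B returns 1; on dp([1, 9, 0], 0, [0, 0, 1], [0, 5, 0]): A returns 6, B returns 6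
import Mathlib
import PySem

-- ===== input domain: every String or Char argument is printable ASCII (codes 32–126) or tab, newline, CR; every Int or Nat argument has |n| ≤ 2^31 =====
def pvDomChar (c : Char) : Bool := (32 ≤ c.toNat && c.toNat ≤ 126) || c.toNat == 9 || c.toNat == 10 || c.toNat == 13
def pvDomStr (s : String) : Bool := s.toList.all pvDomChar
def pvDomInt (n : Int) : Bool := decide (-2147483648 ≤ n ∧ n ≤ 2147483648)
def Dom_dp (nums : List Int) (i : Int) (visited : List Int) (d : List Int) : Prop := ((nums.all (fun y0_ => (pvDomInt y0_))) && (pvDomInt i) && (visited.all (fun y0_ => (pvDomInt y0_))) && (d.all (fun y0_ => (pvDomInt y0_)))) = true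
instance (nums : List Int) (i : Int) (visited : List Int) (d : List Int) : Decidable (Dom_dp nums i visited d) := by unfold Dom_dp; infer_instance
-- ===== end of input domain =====

-- B replaces A's memoized recursion by an explicit iterative walk with a back-fill pass
-- (alternative decomposition; A and B also mutate visited/d in place identically in Python,
-- the equivalence proved here is about the return value).


-- ===== PORT A =====
-- A's recursion, made total by a fuel counter (visited.length + 1 steps always suffice
-- under Pre_: each continuing step turns one visited entry ≠ 1 into 1).  State (visited, d)
-- is threaded explicitly; after the in-range assignment d[i] = 1 + rec, `return d[i]` is
-- exactly the assigned value, which the port returns directly.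
def dpA (fuel : Nat) (nums : List Int) (i : Int) (visited : List Int) (d : List Int) :
    Int × List Int × List Int :=
  match fuel with
  | 0 => (0, visited, d)            -- unreachable under Pre_
  | f+1 =>
    if PySem.List.pyGetD visited i 0 = 1 then (0, visited, d)
    else if PySem.List.pyGetD d i 0 ≠ 0 then (PySem.List.pyGetD d i 0, visited, d)
    else
      let visited' := PySem.List.pySetD visited i 1
      let r := dpA f nums (PySem.List.pyGetD nums i 0) visited' d
      let v := 1 + r.1
      (v, r.2.1, PySem.List.pySetD r.2.2 i v)

def dp (nums : List Int) (i : Int) (visited : List Int) (d : List Int) : Int :=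
  (dpA (visited.length + 1) nums i visited d).1

-- ===== PORT B =====
-- B's while-loop: walk from `current`, appending traversed indices to `path`,
-- until a visited node (base 0) or a memoized node (base d[current]) stops it.
def dpWalk (fuel : Nat) (nums : List Int) (current : Int) (visited : List Int)
    (d : List Int) (path : List Int) : Int × List Int :=
  match fuel with
  | 0 => (0, path)                  -- unreachable under Pre_
  | f+1 =>
    if PySem.List.pyGetD visited current 0 = 1 then (0, path)
    else if PySem.List.pyGetD d current 0 ≠ 0 then (PySem.List.pyGetD d current 0, path)
    else dpWalk f nums (PySem.List.pyGetD nums current 0)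
           (PySem.List.pySetD visited current 1) d (path ++ [current])

-- B's back-fill for-loop over reversed(path): state (d, count).
def dpBackfill (d : List Int) (path : List Int) (base : Int) : List Int :=
  (path.reverse.foldl (fun st idx => (PySem.List.pySetD st.1 idx (st.2 + 1), st.2 + 1))
    (d, base)).1

def dp_alt (nums : List Int) (i : Int) (visited : List Int) (d : List Int) : Int :=
  let w := dpWalk (visited.length + 1) nums i visited d []
  let _d' := dpBackfill d w.2 w.1    -- the in-place d update; unused by the return value
  w.1 + w.2.length

-- ===== PRECONDITION & SPEC =====
-- Pre_ is where the Python A returns without raising: either the walk stops at i itself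
-- (visited[i] == 1, or d[i] != 0 — closed-form reads of the input), or the input is in the
-- natural Array-Nesting domain (equal lengths, i and every entry of nums a valid index), on
-- which the whole walk stays in range.  It still excludes some inputs on which A returns
-- after one or more steps before reaching an out-of-range entry — see claim.json cites.
def Pre_dp (nums : List Int) (i : Int) (visited : List Int) (d : List Int) : Prop :=
  PySem.Raise.InRange visited.length i ∧
  (PySem.List.pyGetD visited i 0 = 1 ∨
   (PySem.Raise.InRange d.length i ∧
    (PySem.List.pyGetD d i 0 ≠ 0 ∨
     (visited.length = nums.length ∧ d.length = nums.length ∧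
      ∀ x ∈ nums, PySem.Raise.InRange nums.length x))))

instance (nums : List Int) (i : Int) (visited : List Int) (d : List Int) :
    Decidable (Pre_dp nums i visited d) := by unfold Pre_dp; infer_instance

def pvWitness_dp : List Int × Int × List Int × List Int := ([2, 0, 1], 0, [0, 0, 0], [0, 0, 0])

def Spec_dp (nums : List Int) (i : Int) (visited : List Int) (d : List Int) (out : Int) : Prop := out = dp_alt nums i visited d
instance (nums : List Int) (i : Int) (visited : List Int) (d : List Int) (out : Int) : Decidable (Spec_dp nums i visited d out) := by unfold Spec_dp; infer_instance

-- ===== CLAIM (what is proved, stated in full; the proofs are below) =====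
def Claim_equal_dp : Prop := ∀ (nums : List Int) (i : Int) (visited : List Int) (d : List Int), Dom_dp nums i visited d → Pre_dp nums i visited d → Spec_dp nums i visited d (dp nums i visited d)

-- ===== LEMMAS AND PROOFS =====

-- Accumulator-free version of B's walk, for the proof only: returns (base, path).
def dpWalkP (fuel : Nat) (nums : List Int) (c : Int) (vis : List Int) (d : List Int) :
    Int × List Int :=
  match fuel with
  | 0 => (0, [])
  | f+1 =>
    if PySem.List.pyGetD vis c 0 = 1 then (0, [])
    else if PySem.List.pyGetD d c 0 ≠ 0 then (PySem.List.pyGetD d c 0, [])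
    else
      let p := dpWalkP f nums (PySem.List.pyGetD nums c 0) (PySem.List.pySetD vis c 1) d
      (p.1, c :: p.2)

theorem dpWalk_acc (fuel : Nat) (nums : List Int) :
    ∀ (c : Int) (vis d acc : List Int),
      dpWalk fuel nums c vis d acc =
        ((dpWalkP fuel nums c vis d).1, acc ++ (dpWalkP fuel nums c vis d).2) := by
  induction fuel with
  | zero => intro c vis d acc; simp [dpWalk, dpWalkP]
  | succ f ih =>
    intro c vis d acc
    simp only [dpWalk, dpWalkP]
    split_ifs with h1 h2
    · simp
    · simp
    · simp [ih]

theorem dpA_eq_walk (fuel : Nat) (nums : List Int) :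
    ∀ (c : Int) (vis d : List Int),
      (dpA fuel nums c vis d).1 =
        (dpWalkP fuel nums c vis d).1 + (dpWalkP fuel nums c vis d).2.length := by
  induction fuel with
  | zero => intro c vis d; simp [dpA, dpWalkP]
  | succ f ih =>
    intro c vis d
    simp only [dpA, dpWalkP]
    split_ifs with h1 h2
    · simp
    · simp
    · simp [ih]; omega

-- ===== VERDICT (by name: the statement is the Claim_ definition above) =====
theorem dp_spec : Claim_equal_dp := by
  intro nums i visited d _hDom _hPre
  show dp nums i visited d = dp_alt nums i visited d
  simp [dp, dp_alt, dpWalk_acc, dpA_eq_walk]
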